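-- pv_equiv track=rewrite | github.com/emilyab3/advent-of-code-2018 | day06/day6part1.py | bounded
-- ===== SOURCE A (Python) =====
-- def bounded(coord, coords):
--     """
--     Determines whether the given coordinate is bounded by the list of coordinates
--     """
--     xmax_bound = False
--     ymax_bound = False
--     xmin_bound = False
--     ymin_bound = False
--
--     for other in coords:
--         if other[0] > coord[0]:
--             xmax_bound = True
--         elif other [0] < coord[0]:
--             xmin_bound = True
--
--         if other[1] > coord[1]:
--             ymax_bound = True
--         elif other[1] < coord[1]:
--             ymin_bound = True
--
--     return xmax_bound and ymax_bound and xmin_bound and ymin_bound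
-- ===== SOURCE B (Python) =====
-- def bounded(coord, coords):
--     x, y = coord[0], coord[1]
--     return (any(o[0] > x for o in coords)
--             and any(o[1] > y for o in coords)
--             and any(o[0] < x for o in coords)
--             and any(o[1] < y for o in coords))
-- ===== Notes on version B (the rewrite author's own statement) =====
-- stated objective: idiomatic
-- what changed: Replaces A's single flag-setting scan over four mutable booleans with four short-circuiting any() generator scans, one per direction.
import Mathlib
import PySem

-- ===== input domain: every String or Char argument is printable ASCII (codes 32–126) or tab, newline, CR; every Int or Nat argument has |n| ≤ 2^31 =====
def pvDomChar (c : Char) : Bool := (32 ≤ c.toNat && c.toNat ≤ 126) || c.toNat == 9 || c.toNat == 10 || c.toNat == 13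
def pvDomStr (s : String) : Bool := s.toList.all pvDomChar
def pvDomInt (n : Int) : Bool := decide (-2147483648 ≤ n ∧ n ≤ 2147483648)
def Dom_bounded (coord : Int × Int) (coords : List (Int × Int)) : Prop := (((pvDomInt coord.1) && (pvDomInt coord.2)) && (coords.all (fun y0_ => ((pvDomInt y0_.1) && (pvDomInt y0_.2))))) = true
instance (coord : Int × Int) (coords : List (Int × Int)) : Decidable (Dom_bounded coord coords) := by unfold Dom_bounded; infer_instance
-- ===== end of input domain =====

-- B replaces A's single flag-setting scan with four per-direction any() scans (idiomatic; same O(n) cost).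


-- ===== PORT A =====
-- loop over coords, updating four flags (xmax, ymax, xmin, ymin) in A's branch order
def boundedLoop (coord : Int × Int) : List (Int × Int) → Bool × Bool × Bool × Bool → Bool × Bool × Bool × Bool
  | [], st => st
  | other :: rest, (xmax, ymax, xmin, ymin) =>
    let (xmax, xmin) :=
      if other.1 > coord.1 then (true, xmin)
      else if other.1 < coord.1 then (xmax, true)
      else (xmax, xmin)
    let (ymax, ymin) :=
      if other.2 > coord.2 then (true, ymin)
      else if other.2 < coord.2 then (ymax, true)
      else (ymax, ymin)
    boundedLoop coord rest (xmax, ymax, xmin, ymin)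

def bounded (coord : Int × Int) (coords : List (Int × Int)) : Bool :=
  let st := boundedLoop coord coords (false, false, false, false)
  st.1 && st.2.1 && st.2.2.1 && st.2.2.2

-- ===== PORT B =====
def bounded_alt (coord : Int × Int) (coords : List (Int × Int)) : Bool :=
  (coords.any fun o => o.1 > coord.1) &&
  (coords.any fun o => o.2 > coord.2) &&
  (coords.any fun o => o.1 < coord.1) &&
  (coords.any fun o => o.2 < coord.2)

-- ===== PRECONDITION & SPEC =====
def Spec_bounded (coord : Int × Int) (coords : List (Int × Int)) (out : Bool) : Prop := out = bounded_alt coord coords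
instance (coord : Int × Int) (coords : List (Int × Int)) (out : Bool) : Decidable (Spec_bounded coord coords out) := by unfold Spec_bounded; infer_instance

-- ===== CLAIM (what is proved, stated in full; the proofs are below) =====
def Claim_equal_bounded : Prop := ∀ (coord : Int × Int) (coords : List (Int × Int)), Dom_bounded coord coords → Spec_bounded coord coords (bounded coord coords)

-- ===== LEMMAS AND PROOFS =====

-- one axis of A's if/elif branch, as a pair update
theorem stepPair (u v : Int) (x y : Bool) :
    (if u > v then (true, y) else if u < v then (x, true) else (x, y))
      = (x || decide (u > v), y || decide (u < v)) := by
  rcases lt_trichotomy u v with h | h | h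
  · simp [h, lt_asymm h]
  · simp [h]
  · simp [h, lt_asymm h]

-- the loop computes, in each component, the initial flag OR the corresponding any-scan
theorem boundedLoop_eq (coord : Int × Int) (coords : List (Int × Int))
    (a b c d : Bool) :
    boundedLoop coord coords (a, b, c, d) =
      (a || coords.any fun o => o.1 > coord.1,
       b || coords.any fun o => o.2 > coord.2,
       c || coords.any fun o => o.1 < coord.1,
       d || coords.any fun o => o.2 < coord.2) := by
  induction coords generalizing a b c d with
  | nil => simp [boundedLoop]
  | cons o rest ih =>
    simp only [boundedLoop, stepPair, List.any_cons, ih, Bool.or_assoc]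

-- ===== VERDICT (by name: the statement is the Claim_ definition above) =====
theorem bounded_spec : Claim_equal_bounded := by
  intro coord coords _
  unfold Spec_bounded bounded bounded_alt
  rw [boundedLoop_eq]
  simp [Bool.and_comm, Bool.and_assoc, Bool.and_left_comm]
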